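-- pv_equiv track=rewrite | github.com/XSpoonAi/spoon-awesome-skill | web3-data-intelligence/sybil-insider-detector/scripts/address_clustering.py | _merge_transitive_relations
-- ===== SOURCE A (Python) =====
-- from typing import List, Dict, Set, Tuple, Optional
--
-- def _merge_transitive_relations(
--
--     relations: Dict[str, Set[str]]
-- ) -> Dict[str, Set[str]]:
--     """Merge transitive relationships into clusters"""
--     clusters = {}
--     visited = set()
--
--     def dfs(addr, cluster):
--         if addr in visited:
--             return
--         visited.add(addr)
--         cluster.add(addr)
--         for related in relations.get(addr, []):
--             dfs(related, cluster)
--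
--     for addr in relations:
--         if addr not in visited:
--             cluster = set()
--             dfs(addr, cluster)
--             if cluster:
--                 representative = min(cluster)  # Use lexicographically smallest as key
--                 clusters[representative] = cluster
--
--     return clusters
-- ===== SOURCE B (Python) =====
-- def _merge_transitive_relations(relations):
--     """Merge transitive relationships into clusters (iterative DFS with an explicit stack)."""
--     clusters = {}
--     visited = set()
--
--     for addr in relations:
--         if addr in visited:
--             continue
--         cluster = set()
--         stack = [addr]
--         while stack:
--             node = stack.pop()
--             if node in visited:
--                 continue
--             visited.add(node)
--             cluster.add(node)
--             # push in reversed order so nodes are expanded in the mapping's order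
--             stack.extend(list(relations.get(node, []))[::-1])
--         if cluster:
--             clusters[min(cluster)] = cluster
--     return clusters
-- ===== Notes on version B (the rewrite author's own statement) =====
-- stated objective: alternative
-- what changed: The recursive dfs helper is replaced by an iterative explicit-stack traversal (pop, skip-if-visited, mark, push neighbours in reversed order), removing the nested function and Python's recursion-depth limit on long chains; same directed traversal and shared visited set.
import Mathlib
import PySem

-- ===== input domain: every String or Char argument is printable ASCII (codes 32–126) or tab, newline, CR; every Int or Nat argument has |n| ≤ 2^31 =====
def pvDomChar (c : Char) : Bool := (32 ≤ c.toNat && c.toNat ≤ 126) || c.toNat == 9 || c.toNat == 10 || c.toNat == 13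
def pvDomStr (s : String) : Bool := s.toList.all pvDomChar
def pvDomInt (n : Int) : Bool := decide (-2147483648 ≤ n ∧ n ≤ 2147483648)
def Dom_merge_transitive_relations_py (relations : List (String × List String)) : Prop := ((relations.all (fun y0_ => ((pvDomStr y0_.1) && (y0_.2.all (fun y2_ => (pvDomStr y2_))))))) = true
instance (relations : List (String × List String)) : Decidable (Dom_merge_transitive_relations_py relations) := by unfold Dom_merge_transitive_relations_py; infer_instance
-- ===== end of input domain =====

-- B replaces A's recursive dfs helper with an explicit-stack iterative DFS (same traversal
-- order, no recursion); the proved equivalence is about the RETURN value (no argument is mutated).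

-- relations.get(addr, [])  (shared by both ports; the dict's set values are modeled as lists)
def pvGet (relations : List (String × List String)) (a : String) : List String :=
  (PySem.Dict.mk relations).getD a []

-- all addresses the traversals can ever see: the dict's keys and all related addresses
def pvUniv (relations : List (String × List String)) : List String :=
  relations.map Prod.fst ++ relations.flatMap Prod.snd

-- number of not-yet-visited addresses: termination measure of B's loop, fuel bound of A's dfs
def pvM (relations : List (String × List String)) (vis : PySem.Set String) : Nat :=
  ((pvUniv relations).filter (fun x => !(PySem.Set.contains vis x))).length

-- the next three lemmas are needed by pvDfsB's termination proof
theorem pvFilter_length_le (u : List String) (p q : String → Bool)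
    (himp : ∀ x, q x = true → p x = true) :
    (u.filter q).length ≤ (u.filter p).length := by
  induction u with
  | nil => simp
  | cons b u ih =>
    cases hq : q b with
    | true => simp [hq, himp b hq]; omega
    | false => cases hp : p b <;> simp [hq, hp] <;> omega

theorem pvFilter_length_lt (u : List String) (p q : String → Bool)
    (himp : ∀ x, q x = true → p x = true) (a : String) (ha : a ∈ u)
    (hpa : p a = true) (hqa : q a = false) :
    (u.filter q).length < (u.filter p).length := by
  induction u with
  | nil => cases ha
  | cons b u ih =>
    rcases List.mem_cons.mp ha with rfl | hb
    · have hle := pvFilter_length_le u p q himp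
      simp [hpa, hqa]
      omega
    · cases hq : q b with
      | true =>
        have hp := himp b hq
        have := ih hb
        simp [hq, hp]
        omega
      | false =>
        have := ih hb
        cases hp : p b <;> simp [hq, hp] <;> omega

theorem pvContains_false_of_add (v : PySem.Set String) (a x : String)
    (hx : PySem.Set.contains (PySem.Set.add v a) x = false) :
    PySem.Set.contains v x = false := by
  cases hcv : PySem.Set.contains v x with
  | false => rfl
  | true =>
    exfalso
    have hm : x ∈ v := (PySem.Set.contains_iff _ _).mp hcv
    have hm2 : x ∈ PySem.Set.add v a := (PySem.Set.mem_add _ _ _).mpr (Or.inl hm)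
    rw [(PySem.Set.contains_iff _ _).mpr hm2] at hx
    cases hx

theorem pvM_add_lt (relations : List (String × List String)) (v : PySem.Set String)
    (a : String) (ha : a ∈ pvUniv relations) (hv : ¬ PySem.Set.contains v a = true) :
    pvM relations (PySem.Set.add v a) < pvM relations v := by
  refine pvFilter_length_lt (pvUniv relations) _ _ ?_ a ha ?_ ?_
  · intro x hx
    rw [Bool.not_eq_true'] at hx ⊢
    exact pvContains_false_of_add v a x hx
  · cases hcv : PySem.Set.contains v a with
    | false => simp
    | true => exact absurd hcv hv
  · simp

theorem pvM_add_not_univ (relations : List (String × List String)) (v : PySem.Set String)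
    (a : String) (ha : a ∉ pvUniv relations) :
    pvM relations (PySem.Set.add v a) = pvM relations v := by
  unfold pvM
  congr 1
  apply List.filter_congr
  intro x hx
  have hxne : x ≠ a := fun e => ha (e ▸ hx)
  congr 1
  rw [Bool.eq_iff_iff]
  constructor
  · intro h
    exact (PySem.Set.contains_iff _ _).mpr
      (Or.resolve_right ((PySem.Set.mem_add _ _ _).mp ((PySem.Set.contains_iff _ _).mp h)) hxne)
  · intro h
    exact (PySem.Set.contains_iff _ _).mpr
      ((PySem.Set.mem_add _ _ _).mpr (Or.inl ((PySem.Set.contains_iff _ _).mp h)))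

theorem pvGet_cons (k : String) (v : List String) (tl : List (String × List String)) (a : String) :
    pvGet ((k, v) :: tl) a = if k == a then v else pvGet tl a := by
  simp only [pvGet, PySem.Dict.getD_eq_get?_getD, PySem.Dict.get?_mk_cons]
  split <;> rfl

theorem pvGet_not_mem (relations : List (String × List String)) (a : String)
    (h : a ∉ relations.map Prod.fst) : pvGet relations a = [] := by
  induction relations with
  | nil => rfl
  | cons p tl ih =>
    obtain ⟨k, v⟩ := p
    simp only [List.map_cons, List.mem_cons, not_or] at h
    rw [pvGet_cons, if_neg (by simpa using Ne.symm h.1)]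
    exact ih h.2

-- ===== PORT A =====
-- the nested recursive 'def dfs(addr, cluster)'; state = (visited, cluster) (both Python
-- sets); fuel only makes the recursion total — the top-level call passes |pvUniv|+1,
-- always enough since each non-skipping call strictly shrinks the unvisited addresses
def pvDfsA (relations : List (String × List String)) :
    Nat → String → (PySem.Set String × PySem.Set String) → (PySem.Set String × PySem.Set String)
  | 0, _, s => s
  | f + 1, addr, s =>
    if PySem.Set.contains s.1 addr then s
    else
      ((pvGet relations addr).foldl (fun t b => pvDfsA relations f b t)
        (PySem.Set.add s.1 addr, PySem.Set.add s.2 addr))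

def merge_transitive_relations_py (relations : List (String × List String)) : List (String × List String) :=
  let F := (pvUniv relations).length + 1
  (((relations.map Prod.fst).foldl
    (fun (acc : PySem.Dict String (List String) × PySem.Set String) addr =>
      if PySem.Set.contains acc.2 addr then acc
      else
        let r := pvDfsA relations F addr (acc.2, PySem.Set.empty)
        match PySem.List.min? r.2 (fun x => x) with
        | some rep => (acc.1.insert rep r.2, r.1)
        | none => (acc.1, r.1))
    (PySem.Dict.empty, PySem.Set.empty)).1).items

-- ===== PORT B =====
-- the 'while stack:' loop of Source B; Python's stack top (end of the list) is modeled as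
-- the HEAD of the Lean list, so 'stack.extend(list(relations.get(node, []))[::-1])'
-- is prepending the neighbour list in order
def pvDfsB (relations : List (String × List String)) :
    List String → (PySem.Set String × PySem.Set String) → (PySem.Set String × PySem.Set String)
  | [], s => s
  | node :: rest, s =>
    if PySem.Set.contains s.1 node then pvDfsB relations rest s
    else pvDfsB relations (pvGet relations node ++ rest)
      (PySem.Set.add s.1 node, PySem.Set.add s.2 node)
termination_by stack s => (pvM relations s.1, stack.length)
decreasing_by
  · exact Prod.Lex.right _ (Nat.lt_succ_self _)
  · rename_i h
    by_cases hu : node ∈ pvUniv relations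
    · exact Prod.Lex.left _ _ (pvM_add_lt relations s.1 node hu h)
    · have hg : pvGet relations node = [] :=
        pvGet_not_mem relations node (fun hk => hu (List.mem_append_left _ hk))
      rw [pvM_add_not_univ relations s.1 node hu, hg]
      exact Prod.Lex.right _ (Nat.lt_succ_self _)

def merge_transitive_relations_py_alt (relations : List (String × List String)) : List (String × List String) :=
  (((relations.map Prod.fst).foldl
    (fun (acc : PySem.Dict String (List String) × PySem.Set String) addr =>
      if PySem.Set.contains acc.2 addr then acc
      else
        let r := pvDfsB relations [addr] (acc.2, PySem.Set.empty)
        match PySem.List.min? r.2 (fun x => x) with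
        | some rep => (acc.1.insert rep r.2, r.1)
        | none => (acc.1, r.1))
    (PySem.Dict.empty, PySem.Set.empty)).1).items

-- ===== PRECONDITION & SPEC =====
def Spec_merge_transitive_relations_py (relations : List (String × List String)) (out : List (String × List String)) : Prop := out = merge_transitive_relations_py_alt relations
instance (relations : List (String × List String)) (out : List (String × List String)) : Decidable (Spec_merge_transitive_relations_py relations out) := by unfold Spec_merge_transitive_relations_py; infer_instance

-- ===== CLAIM (what is proved, stated in full; the proofs are below) =====
def Claim_equal_merge_transitive_relations_py : Prop := ∀ (relations : List (String × List String)), Dom_merge_transitive_relations_py relations → Spec_merge_transitive_relations_py relations (merge_transitive_relations_py relations)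

-- ===== LEMMAS AND PROOFS =====

-- every related address is in pvUniv
theorem pvGet_mem_univ (relations : List (String × List String)) (a x : String)
    (hx : x ∈ pvGet relations a) : x ∈ pvUniv relations := by
  apply List.mem_append_right
  induction relations with
  | nil => rw [pvGet_not_mem [] a (by simp)] at hx; cases hx
  | cons p tl ih =>
    obtain ⟨k, v⟩ := p
    rw [pvGet_cons] at hx
    simp only [List.flatMap_cons, List.mem_append]
    split at hx
    · exact Or.inl hx
    · exact Or.inr (ih hx)

-- pvDfsA only ever adds to visited
theorem pvDfsA_mono (relations : List (String × List String)) :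
    ∀ (f : Nat) (a : String) (s : PySem.Set String × PySem.Set String) (x : String),
      x ∈ s.1 → x ∈ (pvDfsA relations f a s).1 := by
  intro f
  induction f with
  | zero => intro a s x hx; simpa [pvDfsA] using hx
  | succ f ih =>
    intro a s x hx
    simp only [pvDfsA]
    split
    · exact hx
    · have aux : ∀ (l : List String) (t : PySem.Set String × PySem.Set String),
          x ∈ t.1 → x ∈ (l.foldl (fun t b => pvDfsA relations f b t) t).1 := by
        intro l
        induction l with
        | nil => intro t h; simpa using h
        | cons b l ihl => intro t h; exact ihl _ (ih b t x h)
      exact aux _ _ ((PySem.Set.mem_add _ _ _).mpr (Or.inl hx))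

theorem pvDfsA_foldl_mono (relations : List (String × List String)) (f : Nat) :
    ∀ (l : List String) (s : PySem.Set String × PySem.Set String) (x : String),
      x ∈ s.1 → x ∈ (l.foldl (fun t b => pvDfsA relations f b t) s).1 := by
  intro l
  induction l with
  | nil => intro s x h; simpa using h
  | cons b l ihl => intro s x h; exact ihl _ _ (pvDfsA_mono relations f b s x h)

theorem pvM_le_of_mono (relations : List (String × List String))
    (v w : PySem.Set String) (h : ∀ x, x ∈ v → x ∈ w) :
    pvM relations w ≤ pvM relations v := by
  apply pvFilter_length_le
  intro x hx
  rw [Bool.not_eq_true'] at hx ⊢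
  cases hcv : PySem.Set.contains v x with
  | false => rfl
  | true =>
    rw [(PySem.Set.contains_iff _ _).mpr (h x ((PySem.Set.contains_iff _ _).mp hcv))] at hx
    cases hx

theorem pvM_foldl_le (relations : List (String × List String)) (f : Nat)
    (l : List String) (s : PySem.Set String × PySem.Set String) :
    pvM relations (l.foldl (fun t b => pvDfsA relations f b t) s).1 ≤ pvM relations s.1 :=
  pvM_le_of_mono relations _ _ (fun x hx => pvDfsA_foldl_mono relations f l s x hx)

theorem pvM_zero_visited (relations : List (String × List String)) (v : PySem.Set String)
    (hm : pvM relations v = 0) (x : String) (hx : x ∈ pvUniv relations) :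
    PySem.Set.contains v x = true := by
  unfold pvM at hm
  rw [List.length_eq_zero_iff, List.filter_eq_nil_iff] at hm
  have := hm x hx
  simpa using this

-- THE KEY LEMMA: draining B's stack l ++ rest equals running A's recursive dfs on
-- each element of l in order (with enough fuel) and then draining rest
theorem pvKey (relations : List (String × List String)) :
    ∀ (n : Nat) (l : List String), ∀ (s : PySem.Set String × PySem.Set String)
      (rest : List String) (f : Nat),
      pvM relations s.1 ≤ n → (∀ x ∈ l, x ∈ pvUniv relations) →
      pvM relations s.1 + 1 ≤ f →
      pvDfsB relations (l ++ rest) s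
        = pvDfsB relations rest (l.foldl (fun t b => pvDfsA relations f b t) s) := by
  intro n
  induction n with
  | zero =>
    intro l
    induction l with
    | nil => intro s rest f _ _ _; simp
    | cons a l ihl =>
      intro s rest f hm hl hf
      cases f with
      | zero => omega
      | succ f =>
        have hvis : PySem.Set.contains s.1 a = true :=
          pvM_zero_visited relations s.1 (Nat.le_zero.mp hm) a (hl a List.mem_cons_self)
        rw [List.cons_append, pvDfsB, if_pos hvis, List.foldl_cons]
        simp only [pvDfsA, if_pos hvis]
        exact ihl s rest (f + 1) hm (fun x hx => hl x (List.mem_cons_of_mem _ hx)) hf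
  | succ n ihn =>
    intro l
    induction l with
    | nil => intro s rest f _ _ _; simp
    | cons a l ihl =>
      intro s rest f hm hl hf
      cases f with
      | zero => omega
      | succ f =>
      rw [List.cons_append, pvDfsB, List.foldl_cons]
      by_cases hv : PySem.Set.contains s.1 a = true
      · rw [if_pos hv]
        simp only [pvDfsA, if_pos hv]
        exact ihl s rest (f + 1) hm (fun x hx => hl x (List.mem_cons_of_mem _ hx)) hf
      · rw [if_neg hv]
        have ha : a ∈ pvUniv relations := hl a List.mem_cons_self
        set s' : PySem.Set String × PySem.Set String :=
          (PySem.Set.add s.1 a, PySem.Set.add s.2 a) with hs'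
        have hlt : pvM relations s'.1 < pvM relations s.1 := pvM_add_lt relations s.1 a ha hv
        have step1 : pvDfsB relations (pvGet relations a ++ (l ++ rest)) s'
            = pvDfsB relations (l ++ rest)
                ((pvGet relations a).foldl (fun t b => pvDfsA relations f b t) s') := by
          apply ihn (pvGet relations a) s' (l ++ rest) f (by omega)
            (fun x hx => pvGet_mem_univ relations a x hx) (by omega)
        have hA : pvDfsA relations (f + 1) a s
            = (pvGet relations a).foldl (fun t b => pvDfsA relations f b t) s' := by
          simp only [pvDfsA, if_neg hv, hs']
        rw [step1, hA]
        set s2 := (pvGet relations a).foldl (fun t b => pvDfsA relations f b t) s' with hs2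
        have hm2 : pvM relations s2.1 ≤ pvM relations s'.1 := pvM_foldl_le relations f _ s'
        exact ihn l s2 rest (f + 1) (by omega)
          (fun x hx => hl x (List.mem_cons_of_mem _ hx)) (by omega)

-- a single start address: B's stack loop computes exactly A's recursive dfs
theorem pvDfsB_single (relations : List (String × List String)) (addr : String)
    (haddr : addr ∈ pvUniv relations) (s : PySem.Set String × PySem.Set String) :
    pvDfsB relations [addr] s
      = pvDfsA relations ((pvUniv relations).length + 1) addr s := by
  have h := pvKey relations (pvM relations s.1) [addr] s []
      ((pvUniv relations).length + 1) le_rfl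
      (by intro x hx; simp only [List.mem_singleton] at hx; subst hx; exact haddr)
      (by have : pvM relations s.1 ≤ (pvUniv relations).length := List.length_filter_le _ _
          omega)
  simpa [pvDfsB] using h

theorem merge_transitive_relations_py_spec : Claim_equal_merge_transitive_relations_py := by
  intro relations _
  unfold Spec_merge_transitive_relations_py merge_transitive_relations_py merge_transitive_relations_py_alt
  have key : List.foldl
      (fun (acc : PySem.Dict String (List String) × PySem.Set String) addr =>
        if PySem.Set.contains acc.2 addr then acc
        else
          let r := pvDfsA relations ((pvUniv relations).length + 1) addr (acc.2, PySem.Set.empty)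
          match PySem.List.min? r.2 (fun x => x) with
          | some rep => (acc.1.insert rep r.2, r.1)
          | none => (acc.1, r.1))
      (PySem.Dict.empty, PySem.Set.empty) (relations.map Prod.fst)
    = List.foldl
      (fun (acc : PySem.Dict String (List String) × PySem.Set String) addr =>
        if PySem.Set.contains acc.2 addr then acc
        else
          let r := pvDfsB relations [addr] (acc.2, PySem.Set.empty)
          match PySem.List.min? r.2 (fun x => x) with
          | some rep => (acc.1.insert rep r.2, r.1)
          | none => (acc.1, r.1))
      (PySem.Dict.empty, PySem.Set.empty) (relations.map Prod.fst) := by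
    apply PySem.List.foldl_congr_mem
    intro acc addr hmem
    by_cases hv : PySem.Set.contains acc.2 addr = true
    · simp only [if_pos hv]
    · simp only [if_neg hv]
      rw [pvDfsB_single relations addr (List.mem_append_left _ hmem) (acc.2, PySem.Set.empty)]
  exact congrArg (fun z => z.1.items) key
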